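-- pv_equiv track=rewrite | github.com/xulei-shl/Library-AI-demos | book-echoes/src/core/recommendation/config.py | even_batches
-- ===== SOURCE A (Python) =====
-- import math
--
-- MAX_BATCH_SIZE = 20
--
-- def even_batches(total: int, max_batch_size: int = MAX_BATCH_SIZE) -> list:
--     if total <= 0:
--         return []
--     num_batches = math.ceil(total / max_batch_size)
--     base = total // num_batches
--     rem = total % num_batches
--     sizes = []
--     for i in range(num_batches):
--         sizes.append(base + (1 if i < rem else 0))
--     return sizes
-- ===== SOURCE B (Python) =====
-- import math
--
-- MAX_BATCH_SIZE = 20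
--
-- def even_batches(total: int, max_batch_size: int = MAX_BATCH_SIZE) -> list:
--     if total <= 0:
--         return []
--     sizes = []
--     remaining = total
--     batches_left = math.ceil(total / max_batch_size)
--     # greedy: each step takes the ceiling of an even split of what is left
--     while batches_left > 0:
--         s = -(-remaining // batches_left)
--         sizes.append(s)
--         remaining -= s
--         batches_left -= 1
--     return sizes
-- ===== Notes on version B (the rewrite author's own statement) =====
-- stated objective: alternative
-- what changed: replaces precomputing base=total//n and rem=total%n and looping over indices with a conditional by a greedy recursive peeling that at each step takes ceil(remaining/batches_left) as the next batch size
-- outside the precondition, e.g. on even_batches(5, 0): A raises ZeroDivisionError, B raises ZeroDivisionError; on even_batches(5, -10): A raises ZeroDivisionError, B returns []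
import Mathlib
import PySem

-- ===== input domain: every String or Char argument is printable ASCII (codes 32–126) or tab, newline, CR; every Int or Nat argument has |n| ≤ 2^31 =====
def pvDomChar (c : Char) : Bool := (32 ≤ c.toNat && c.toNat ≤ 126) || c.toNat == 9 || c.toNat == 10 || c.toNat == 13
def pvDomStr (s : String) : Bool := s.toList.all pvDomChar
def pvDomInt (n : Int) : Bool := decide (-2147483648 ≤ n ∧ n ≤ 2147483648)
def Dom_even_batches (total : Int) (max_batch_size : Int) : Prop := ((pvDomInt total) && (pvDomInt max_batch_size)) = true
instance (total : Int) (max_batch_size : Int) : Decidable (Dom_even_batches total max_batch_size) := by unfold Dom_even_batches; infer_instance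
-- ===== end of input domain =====

-- B replaces A's base/rem precomputation + indexed loop by a greedy recursion
-- that peels off ceil(remaining/batches_left) at each step; objective: alternative.

-- ===== PORT A =====
-- math.ceil(total / max_batch_size) is ported as exact integer ceiling division
-- -((-total) // max_batch_size): on Dom (|args| ≤ 2^31) the float quotient's relative
-- error (< 2^-52) is too small to move it across an integer, so float ceil = exact ceil.
def even_batches (total : Int) (max_batch_size : Int) : List Int :=
  if total ≤ 0 then []
  else
    let num_batches := -(PySem.Int.floordiv (-total) max_batch_size)
    let base := PySem.Int.floordiv total num_batches
    let rem := PySem.Int.mod total num_batches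
    (PySem.List.pyRange 0 num_batches 1).foldl
      (fun sizes i => sizes ++ [base + (if i < rem then 1 else 0)]) []

-- ===== PORT B =====
def even_batches_peel (remaining : Int) (batches_left : Int) : List Int :=
  if batches_left ≤ 0 then []
  else
    let s := -(PySem.Int.floordiv (-remaining) batches_left)
    s :: even_batches_peel (remaining - s) (batches_left - 1)
termination_by batches_left.toNat
decreasing_by omega

-- math.ceil in B's top level ported as exact integer ceiling division (same note as for A)
def even_batches_alt (total : Int) (max_batch_size : Int) : List Int :=
  if total ≤ 0 then []
  else even_batches_peel total (-(PySem.Int.floordiv (-total) max_batch_size))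

-- ===== PRECONDITION & SPEC =====
-- Pre_ excludes exactly the inputs where Python A raises ZeroDivisionError:
-- max_batch_size = 0 (in total / max_batch_size), or max_batch_size < 0 with
-- 0 < total < -max_batch_size (then num_batches = 0 and total // num_batches raises).
def Pre_even_batches (total : Int) (max_batch_size : Int) : Prop :=
  total ≤ 0 ∨ 0 < max_batch_size ∨ (max_batch_size < 0 ∧ -max_batch_size ≤ total)
instance (total : Int) (max_batch_size : Int) : Decidable (Pre_even_batches total max_batch_size) := by unfold Pre_even_batches; infer_instance
def pvWitness_even_batches : Int × Int := (45, 20)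

def Spec_even_batches (total : Int) (max_batch_size : Int) (out : List Int) : Prop := out = even_batches_alt total max_batch_size
instance (total : Int) (max_batch_size : Int) (out : List Int) : Decidable (Spec_even_batches total max_batch_size out) := by unfold Spec_even_batches; infer_instance

-- ===== CLAIM (what is proved, stated in full; the proofs are below) =====
def Claim_equal_even_batches : Prop := ∀ (total : Int) (max_batch_size : Int), Dom_even_batches total max_batch_size → Pre_even_batches total max_batch_size → Spec_even_batches total max_batch_size (even_batches total max_batch_size)

-- ===== LEMMAS AND PROOFS =====

-- unfold lemmas for the greedy peel (it is defined by well-founded recursion)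
lemma peel_nil (t k : Int) (h : k ≤ 0) : even_batches_peel t k = [] := by
  rw [even_batches_peel, if_pos h]

lemma peel_cons (t k : Int) (h : ¬ k ≤ 0) :
    even_batches_peel t k =
      (-(PySem.Int.floordiv (-t) k)) ::
        even_batches_peel (t - -(PySem.Int.floordiv (-t) k)) (k - 1) := by
  rw [even_batches_peel, if_neg h]

-- A's loop over range(n) with its per-index conditional equals the two homogeneous segments
lemma map_ite_range_eq_two_segments (base : Int) (r n : ℕ) (h : r ≤ n) :
    (List.range n).map (fun k : ℕ => base + if (k : Int) < (r : Int) then 1 else 0) =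
      List.replicate r (base + 1) ++ List.replicate (n - r) base := by
  induction n with
  | zero =>
    have : r = 0 := Nat.le_zero.mp h
    simp [this]
  | succ n ih =>
    rcases Nat.lt_or_ge r (n + 1) with hr | hr
    · have hrn : r ≤ n := Nat.lt_succ_iff.mp hr
      rw [List.range_succ, List.map_append, ih hrn]
      have : ¬ ((n : Int) < (r : Int)) := by exact_mod_cast Nat.not_lt.mpr hrn
      simp only [List.map_cons, List.map_nil, if_neg this]
      rw [List.append_assoc]
      congr 1
      have hs : n + 1 - r = (n - r) + 1 := by omega
      rw [hs, List.replicate_succ']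
      simp
    · have hr' : r = n + 1 := le_antisymm h hr
      subst hr'
      have : (List.range (n + 1)).map
          (fun k : ℕ => base + if (k : Int) < ((n + 1 : ℕ) : Int) then 1 else 0) =
          (List.range (n + 1)).map (fun _ : ℕ => base + 1) := by
        apply List.map_congr_left
        intro k hk
        have hk' : (k : Int) < ((n + 1 : ℕ) : Int) := by
          exact_mod_cast List.mem_range.mp hk
        rw [if_pos hk']
      rw [this]
      simp [List.map_const']

-- the ceiling step of the greedy peel, expressed through floor quotient and remainder
lemma ceil_step (t k : Int) (hk : 0 < k) :
    -(PySem.Int.floordiv (-t) k) = t / k + (if t % k = 0 then 0 else 1) := by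
  have h1 := Int.emod_nonneg t (by omega : k ≠ 0)
  have h2 := Int.emod_lt_of_pos t hk
  have h3 := Int.ediv_add_emod t k
  rw [PySem.Int.neg_floordiv_neg_eq_iff_of_pos hk]
  by_cases h : t % k = 0
  · simp only [if_pos h]
    constructor
    · linarith [h1, h2, h3, hk]
    · linarith [h1, h2, h3, hk]
  · have hpos : 0 < t % k := lt_of_le_of_ne h1 (Ne.symm h)
    simp only [if_neg h]
    constructor
    · linarith [h1, h2, h3, hk, hpos]
    · linarith [h1, h2, h3, hk, hpos]

-- B's greedy peel produces exactly the two homogeneous segments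
lemma peel_two_segments : ∀ (n : ℕ) (t : Int),
    even_batches_peel t ((n : Int) + 1) =
      List.replicate (t % ((n : Int) + 1)).toNat (t / ((n : Int) + 1) + 1) ++
      List.replicate ((((n : Int) + 1) - t % ((n : Int) + 1)).toNat) (t / ((n : Int) + 1)) := by
  intro n
  induction n with
  | zero =>
    intro t
    simp only [Nat.cast_zero, zero_add]
    rw [peel_cons t 1 (by omega), peel_nil _ (1 - 1) (by omega)]
    rw [ceil_step t 1 (by omega)]
    simp
  | succ m ih =>
    intro t
    simp only [Nat.cast_add, Nat.cast_one]
    set k : Int := ((m : Int) + 1) + 1 with hk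
    have hkpos : 0 < k := by omega
    have hb := Int.ediv_add_emod t k
    have hr0 : 0 ≤ t % k := Int.emod_nonneg t (by omega)
    have hrk : t % k < k := Int.emod_lt_of_pos t hkpos
    rw [peel_cons t k (by omega), ceil_step t k hkpos]
    have hk1 : k - 1 = (m : Int) + 1 := by omega
    by_cases h : t % k = 0
    · -- even split: s = t/k, remainder stays 0
      simp only [if_pos h, add_zero]
      have harg : t - t / k = ((m : Int) + 1) * (t / k) := by linarith [hb]
      have hq : (((m : Int) + 1) * (t / k)) / ((m : Int) + 1) = t / k :=
        Int.mul_ediv_cancel_left _ (by omega : ((m : Int) + 1) ≠ 0)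
      have hm0 : (((m : Int) + 1) * (t / k)) % ((m : Int) + 1) = 0 := Int.mul_emod_right _ _
      rw [hk1, harg, ih, hq, hm0, h]
      rw [show ((0 : Int)).toNat = 0 from rfl]
      simp only [List.replicate_zero, List.nil_append]
      have h1 : (((m : Int) + 1) - 0).toNat = m + 1 := by omega
      have h2 : (k - 0).toNat = m + 2 := by omega
      rw [h1, h2, ← List.replicate_succ]
    · -- uneven: s = t/k + 1, remainder drops by one
      simp only [if_neg h]
      have harg : t - (t / k + 1) = (t % k - 1) + ((m : Int) + 1) * (t / k) := by linarith [hb]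
      have hr1 : 0 ≤ t % k - 1 := by omega
      have hr2 : t % k - 1 < (m : Int) + 1 := by omega
      have hq : ((t % k - 1) + ((m : Int) + 1) * (t / k)) / ((m : Int) + 1) = t / k := by
        rw [Int.add_mul_ediv_left _ _ (by omega : ((m : Int) + 1) ≠ 0),
            Int.ediv_eq_zero_of_lt hr1 hr2, zero_add]
      have hm1 : ((t % k - 1) + ((m : Int) + 1) * (t / k)) % ((m : Int) + 1) = t % k - 1 := by
        rw [Int.add_mul_emod_self_left, Int.emod_eq_of_lt hr1 hr2]
      rw [hk1, harg, ih, hq, hm1]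
      have h1 : (t % k - 1).toNat + 1 = (t % k).toNat := by omega
      have h2 : (((m : Int) + 1) - (t % k - 1)).toNat = (k - t % k).toNat := by omega
      rw [h2, ← List.cons_append, ← List.replicate_succ, h1]

lemma even_batches_agree (total m : Int)
    (hpre : Pre_even_batches total m) :
    even_batches total m = even_batches_alt total m := by
  by_cases ht : total ≤ 0
  · simp [even_batches, even_batches_alt, ht]
  · have htpos : 0 < total := lt_of_not_ge ht
    unfold even_batches even_batches_alt
    rw [if_neg ht, if_neg ht]
    dsimp only
    set n := -(PySem.Int.floordiv (-total) m) with hn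
    set base := PySem.Int.floordiv total n with hbase
    set rem := PySem.Int.mod total n with hrem
    rw [PySem.List.foldl_append_singleton_eq_map, List.nil_append]
    rcases hpre with h0 | hm | ⟨hmneg, hge⟩
    · omega
    · -- positive divisor: 1 ≤ n; A's two segments = B's peel via peel_two_segments
      have hfd : PySem.Int.floordiv (-total) m < 0 := by
        rw [PySem.Int.floordiv_lt_iff_lt_mul hm]
        omega
      have hn1 : 1 ≤ n := by omega
      have hnpos : (0 : Int) < n := by omega
      obtain ⟨p, hp⟩ : ∃ p : ℕ, n = (p : Int) + 1 :=
        ⟨(n - 1).toNat, by omega⟩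
      have hrem_emod : rem = total % n := by
        rw [hrem, PySem.Int.mod_eq_emod_of_pos hnpos]
      have hbase_ediv : base = total / n := by
        rw [hbase, PySem.Int.floordiv_eq_ediv_of_pos hnpos]
      have hr0 : 0 ≤ rem := by
        rw [hrem_emod]; exact Int.emod_nonneg total (by omega)
      have hrlt : rem < n := by
        rw [hrem_emod]; exact Int.emod_lt_of_pos total hnpos
      have hcast_rem : ((rem.toNat : ℕ) : Int) = rem := Int.toNat_of_nonneg hr0
      have hrle : rem.toNat ≤ n.toNat := by omega
      rw [PySem.List.pyRange_one 0 n]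
      have hsub : (n - 0).toNat = n.toNat := by omega
      rw [hsub, List.map_map]
      have hstep : ((fun i => base + if i < rem then 1 else 0) ∘ fun k : ℕ => (0 : Int) + (k : Int)) =
          fun k : ℕ => base + if (k : Int) < ((rem.toNat : ℕ) : Int) then 1 else 0 := by
        funext k
        simp [Function.comp, hcast_rem]
      rw [hstep, map_ite_range_eq_two_segments base rem.toNat n.toNat hrle]
      rw [hp, peel_two_segments p total, ← hp, ← hrem_emod, ← hbase_ediv]
      congr 2
      omega
    · -- negative divisor with -m ≤ total: n ≤ -1, both sides empty
      have hfd : 1 ≤ PySem.Int.floordiv (-total) m := by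
        have := PySem.Int.floordiv_neg_neg total (-m)
        simp only [neg_neg] at this
        rw [this, PySem.Int.le_floordiv_iff_mul_le (by omega : (0:Int) < -m)]
        omega
      have hnneg : n ≤ -1 := by omega
      have h3 : PySem.List.pyRange 0 n 1 = [] :=
        PySem.List.pyRange_one_eq_nil (by omega : n ≤ 0)
      rw [h3, peel_nil total n (by omega)]
      simp

-- ===== VERDICT (by name: the statement is the Claim_ definition above) =====
theorem even_batches_spec : Claim_equal_even_batches := by
  intro total m _ hpre
  unfold Spec_even_batches
  exact even_batches_agree total m hpre
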